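-- pv_equiv track=rewrite | github.com/yistLin/cv2016fall | hw7/thinning.py | markIB
-- ===== SOURCE A (Python) =====
-- def markIB(data, hei, wid):
--     result = [0] * len(data)
--     for y in range(1, hei-1):
--         for x in range(1, wid-1):
--             curr = y * wid + x
--             count = 0
--             if data[curr]:
--                 count += data[curr-1] + data[curr+1]
--                 count += data[curr-wid-1] + data[curr-wid] + data[curr-wid+1]
--                 count += data[curr+wid-1] + data[curr+wid] + data[curr+wid+1]
--                 if count < 8:
--                     result[curr] = 255
--                 elif count == 8:
--                     result[curr] = 2
--     return result
-- ===== SOURCE B (Python) =====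
-- def markIB(data, hei, wid):
--     # Separable pass: H[i] holds the horizontal 3-sum centred at i for every
--     # row, so the 3x3 sum at a pixel is H[i-wid] + H[i] + H[i+wid].
--     if hei > 2 and wid > 2:
--         H = [0] * (hei * wid)
--         for y in range(hei):
--             base = y * wid
--             for x in range(1, wid - 1):
--                 i = base + x
--                 H[i] = data[i - 1] + data[i] + data[i + 1]
--     else:
--         H = []
--     result = [0] * len(data)
--     for y in range(1, hei - 1):
--         base = y * wid
--         for x in range(1, wid - 1):
--             i = base + x
--             v = data[i]
--             if v:
--                 count = H[i - wid] + H[i] + H[i + wid] - v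
--                 if count < 8:
--                     result[i] = 255
--                 elif count == 8:
--                     result[i] = 2
--     return result
-- ===== Notes on version B (the rewrite author's own statement) =====
-- stated objective: alternative
-- what changed: B computes the 3x3 window as a separable box filter: a first pass builds a table H of horizontal 3-sums per row, and the per-pixel pass gets the 8-neighbour count as H[i-wid]+H[i]+H[i+wid]-data[i] (3 table reads instead of 8 scattered data reads).
-- outside the precondition, e.g. on markIB([0, 0, 0, 0, 0], 3, 3): A returns [0, 0, 0, 0, 0], B raises IndexError
import Mathlib
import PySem

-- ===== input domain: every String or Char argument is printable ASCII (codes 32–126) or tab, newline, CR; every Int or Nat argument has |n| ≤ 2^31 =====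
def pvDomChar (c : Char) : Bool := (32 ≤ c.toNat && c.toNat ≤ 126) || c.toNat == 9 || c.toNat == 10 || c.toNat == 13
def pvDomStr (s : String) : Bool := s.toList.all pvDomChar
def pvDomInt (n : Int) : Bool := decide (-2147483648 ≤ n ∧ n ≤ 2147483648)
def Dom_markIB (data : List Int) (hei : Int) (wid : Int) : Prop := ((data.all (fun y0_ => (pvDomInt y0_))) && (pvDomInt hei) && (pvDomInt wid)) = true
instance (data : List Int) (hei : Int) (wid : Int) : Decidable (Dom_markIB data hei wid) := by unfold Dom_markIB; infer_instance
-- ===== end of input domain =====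

-- B replaces A's eight scattered neighbour reads per pixel with a separable box filter:
-- a first pass builds a table of horizontal 3-sums, the per-pixel pass adds three table entries.
-- Same cost class; alternative algorithm.

-- ===== PORT A =====
-- data[i] / result[i] = …: all indices reached are in range under Pre_markIB (Python raises
-- IndexError outside it), so they are ported with pyGetD / pySetD.
def markIB (data : List Int) (hei : Int) (wid : Int) : List Int :=
  (PySem.List.pyRange 1 (hei - 1)).foldl (fun res y =>
    (PySem.List.pyRange 1 (wid - 1)).foldl (fun res x =>
      let curr := y * wid + x
      if PySem.List.pyGetD data curr 0 ≠ 0 then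
        let count :=
          PySem.List.pyGetD data (curr - 1) 0 + PySem.List.pyGetD data (curr + 1) 0
          + PySem.List.pyGetD data (curr - wid - 1) 0 + PySem.List.pyGetD data (curr - wid) 0
          + PySem.List.pyGetD data (curr - wid + 1) 0
          + PySem.List.pyGetD data (curr + wid - 1) 0 + PySem.List.pyGetD data (curr + wid) 0
          + PySem.List.pyGetD data (curr + wid + 1) 0
        if count < 8 then PySem.List.pySetD res curr 255
        else if count = 8 then PySem.List.pySetD res curr 2
        else res
      else res) res) (List.replicate data.length 0)

-- ===== PORT B =====
def markIB_alt (data : List Int) (hei : Int) (wid : Int) : List Int :=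
  let H : List Int :=
    if 2 < hei ∧ 2 < wid then
      (PySem.List.pyRange 0 hei).foldl (fun H y =>
        (PySem.List.pyRange 1 (wid - 1)).foldl (fun H x =>
          let i := y * wid + x
          PySem.List.pySetD H i
            (PySem.List.pyGetD data (i - 1) 0 + PySem.List.pyGetD data i 0
             + PySem.List.pyGetD data (i + 1) 0)) H) (List.replicate (hei * wid).toNat 0)
    else []
  (PySem.List.pyRange 1 (hei - 1)).foldl (fun res y =>
    (PySem.List.pyRange 1 (wid - 1)).foldl (fun res x =>
      let i := y * wid + x
      let v := PySem.List.pyGetD data i 0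
      if v ≠ 0 then
        let count := PySem.List.pyGetD H (i - wid) 0 + PySem.List.pyGetD H i 0
                     + PySem.List.pyGetD H (i + wid) 0 - v
        if count < 8 then PySem.List.pySetD res i 255
        else if count = 8 then PySem.List.pySetD res i 2
        else res
      else res) res) (List.replicate data.length 0)

-- ===== PRECONDITION & SPEC =====
-- Pre_: exactly where Python A is guaranteed to return: with an interior (hei,wid ≥ 3) the loops
-- read data up to index hei*wid-1, so the buffer must hold hei*wid entries; without an interior
-- nothing is read. Excluded (A may still return there): shorter buffers on which every reached
-- centre pixel happens to be 0, so A's neighbour reads never fire — B's filter pass does read there.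
def Pre_markIB (data : List Int) (hei : Int) (wid : Int) : Prop :=
  hei ≤ 2 ∨ wid ≤ 2 ∨ hei * wid ≤ (data.length : Int)
instance (data : List Int) (hei : Int) (wid : Int) : Decidable (Pre_markIB data hei wid) := by
  unfold Pre_markIB; infer_instance
def pvWitness_markIB : List Int × Int × Int := ([1, 1, 1, 1, 1, 1, 1, 1, 1], 3, 3)
def Spec_markIB (data : List Int) (hei : Int) (wid : Int) (out : List Int) : Prop := out = markIB_alt data hei wid
instance (data : List Int) (hei : Int) (wid : Int) (out : List Int) : Decidable (Spec_markIB data hei wid out) := by unfold Spec_markIB; infer_instance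

-- ===== CLAIM (what is proved, stated in full; the proofs are below) =====
def Claim_equal_markIB : Prop := ∀ (data : List Int) (hei : Int) (wid : Int), Dom_markIB data hei wid → Pre_markIB data hei wid → Spec_markIB data hei wid (markIB data hei wid)

-- ===== LEMMAS AND PROOFS =====

-- the horizontal 3-sum at index j (proof abbreviation for the values B's first pass stores)
def pvHs (data : List Int) (j : Int) : Int :=
  PySem.List.pyGetD data (j - 1) 0 + PySem.List.pyGetD data j 0 + PySem.List.pyGetD data (j + 1) 0

-- the row folds preserve length
lemma pv_scatter_len (data : List Int) (b : Int) (L : List Int) :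
    ∀ (H : List Int),
      (L.foldl (fun H x => PySem.List.pySetD H (b + x) (pvHs data (b + x))) H).length
        = H.length := by
  induction L with
  | nil => intro H; rfl
  | cons a t ih =>
    intro H
    simp only [List.foldl_cons]
    rw [ih, PySem.List.length_pySetD]

-- one row of the first pass: a scatter of pvHs values over indices b+lo .. b+wid-2
lemma pv_row_get (data : List Int) (wid b : Int) (hb : 0 ≤ b) :
    ∀ (n : Nat) (lo : Int), (wid - 1 - lo).toNat = n → 1 ≤ lo →
    ∀ (H : List Int) (j : Int), 0 ≤ j →
    ((PySem.List.pyRange lo (wid - 1)).foldl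
        (fun H x => PySem.List.pySetD H (b + x) (pvHs data (b + x))) H)[j.toNat]?
      = if lo ≤ j - b ∧ j - b < wid - 1 then
          (if j.toNat < H.length then some (pvHs data j) else none)
        else H[j.toNat]? := by
  intro n
  induction n with
  | zero =>
    intro lo hn hlo H j hj
    rw [PySem.List.pyRange_one_eq_nil (by omega)]
    simp only [List.foldl_nil]
    rw [if_neg (show ¬(lo ≤ j - b ∧ j - b < wid - 1) by omega)]
  | succ m ih =>
    intro lo hn hlo H j hj
    have hlt : lo < wid - 1 := by omega
    rw [PySem.List.pyRange_one_cons hlt]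
    simp only [List.foldl_cons]
    rw [ih (lo + 1) (by omega) (by omega) _ j hj]
    rw [PySem.List.pySetD_of_nonneg _ _ (show (0:Int) ≤ b + lo by omega)]
    simp only [List.length_set]
    by_cases hcase : j - b = lo
    · have hbl : j = b + lo := by omega
      rw [if_neg (show ¬(lo + 1 ≤ j - b ∧ j - b < wid - 1) by omega)]
      rw [if_pos (show lo ≤ j - b ∧ j - b < wid - 1 from ⟨by omega, by omega⟩)]
      subst hbl
      rw [List.getElem?_set, if_pos rfl]
    · have hne : (b + lo).toNat ≠ j.toNat := by omega
      rw [List.getElem?_set, if_neg hne]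
      by_cases hc2 : lo + 1 ≤ j - b ∧ j - b < wid - 1
      · rw [if_pos hc2,
            if_pos (show lo ≤ j - b ∧ j - b < wid - 1 from ⟨by omega, hc2.2⟩)]
      · rw [if_neg hc2,
            if_neg (show ¬(lo ≤ j - b ∧ j - b < wid - 1) by omega)]

-- the whole first pass: H[j] = pvHs j on every interior column of every row, untouched elsewhere
lemma pv_grid_get (data : List Int) (wid hei : Int) (hw : 0 < wid) :
    ∀ (n : Nat) (ylo : Int), (hei - ylo).toNat = n → 0 ≤ ylo →
    ∀ (H : List Int) (j : Int), 0 ≤ j →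
    ((PySem.List.pyRange ylo hei).foldl (fun H y =>
        (PySem.List.pyRange 1 (wid - 1)).foldl
          (fun H x => PySem.List.pySetD H (y * wid + x) (pvHs data (y * wid + x))) H) H)[j.toNat]?
      = if ∃ y ∈ PySem.List.pyRange ylo hei, 1 ≤ j - y * wid ∧ j - y * wid < wid - 1 then
          (if j.toNat < H.length then some (pvHs data j) else none)
        else H[j.toNat]? := by
  intro n
  induction n with
  | zero =>
    intro ylo hn hylo H j hj
    rw [PySem.List.pyRange_one_eq_nil (show hei ≤ ylo by omega)]
    simp
  | succ m ih =>
    intro ylo hn hylo H j hj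
    have hlt : ylo < hei := by omega
    rw [PySem.List.pyRange_one_cons hlt]
    simp only [List.foldl_cons]
    rw [ih (ylo + 1) (by omega) (by omega) _ j hj]
    have hrow := pv_row_get data wid (ylo * wid) (by positivity)
      (wid - 1 - 1).toNat 1 rfl le_rfl H j hj
    have hlen := pv_scatter_len data (ylo * wid) (PySem.List.pyRange 1 (wid - 1)) H
    by_cases hrest : ∃ y ∈ PySem.List.pyRange (ylo + 1) hei,
        1 ≤ j - y * wid ∧ j - y * wid < wid - 1
    · rw [if_pos hrest, hlen]
      obtain ⟨y, hmem, hy⟩ := hrest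
      rw [if_pos (show ∃ y' ∈ ylo :: PySem.List.pyRange (ylo + 1) hei,
            1 ≤ j - y' * wid ∧ j - y' * wid < wid - 1 from
          ⟨y, List.mem_cons_of_mem _ hmem, hy⟩)]
    · rw [if_neg hrest, hrow]
      by_cases hhere : 1 ≤ j - ylo * wid ∧ j - ylo * wid < wid - 1
      · rw [if_pos (show (1:Int) ≤ j - ylo * wid ∧ j - ylo * wid < wid - 1 from hhere)]
        rw [if_pos (show ∃ y' ∈ ylo :: PySem.List.pyRange (ylo + 1) hei,
              1 ≤ j - y' * wid ∧ j - y' * wid < wid - 1 from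
            ⟨ylo, List.mem_cons_self, hhere⟩)]
      · rw [if_neg (show ¬((1:Int) ≤ j - ylo * wid ∧ j - ylo * wid < wid - 1) from hhere)]
        rw [if_neg (show ¬∃ y' ∈ ylo :: PySem.List.pyRange (ylo + 1) hei,
              1 ≤ j - y' * wid ∧ j - y' * wid < wid - 1 from by
            rintro ⟨y, hmem, hy⟩
            rcases List.mem_cons.mp hmem with h | h
            · exact hhere (h ▸ hy)
            · exact hrest ⟨y, h, hy⟩)]

-- reading the finished table at an interior column gives the horizontal 3-sum
lemma pv_H_read (data : List Int) (hei wid : Int) (hw : 2 < wid)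
    (y x : Int) (hy0 : 0 ≤ y) (hy1 : y < hei) (hx0 : 1 ≤ x) (hx1 : x < wid - 1) :
    PySem.List.pyGetD
      ((PySem.List.pyRange 0 hei).foldl (fun H y =>
        (PySem.List.pyRange 1 (wid - 1)).foldl
          (fun H x => PySem.List.pySetD H (y * wid + x)
            (PySem.List.pyGetD data (y * wid + x - 1) 0 + PySem.List.pyGetD data (y * wid + x) 0
             + PySem.List.pyGetD data (y * wid + x + 1) 0)) H)
        (List.replicate (hei * wid).toNat 0)) (y * wid + x) 0
      = pvHs data (y * wid + x) := by
  show PySem.List.pyGetD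
      ((PySem.List.pyRange 0 hei).foldl (fun H y =>
        (PySem.List.pyRange 1 (wid - 1)).foldl
          (fun H x => PySem.List.pySetD H (y * wid + x) (pvHs data (y * wid + x))) H)
        (List.replicate (hei * wid).toNat 0)) (y * wid + x) 0
      = pvHs data (y * wid + x)
  have hj0 : 0 ≤ y * wid + x := by positivity
  have hjlt : y * wid + x < hei * wid := by
    have h1 : (y + 1) * wid ≤ hei * wid := mul_le_mul_of_nonneg_right (by omega) (by omega)
    nlinarith
  rw [PySem.List.pyGetD_of_nonneg _ _ hj0, List.getD_eq_getElem?_getD]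
  rw [pv_grid_get data wid hei (by omega) (hei - 0).toNat 0 rfl le_rfl _ _ hj0]
  rw [if_pos (show ∃ y' ∈ PySem.List.pyRange 0 hei,
        1 ≤ (y * wid + x) - y' * wid ∧ (y * wid + x) - y' * wid < wid - 1 from
      ⟨y, by rw [PySem.List.mem_pyRange_one]; omega, by omega, by omega⟩)]
  rw [if_pos (show (y * wid + x).toNat < (List.replicate (hei * wid).toNat (0:Int)).length by
    simp only [List.length_replicate]; omega)]
  rfl

-- the three horizontal 3-sums around a pixel, minus the centre, are A's eight neighbour reads
lemma pv_count_eq (data : List Int) (wid y x : Int) :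
    pvHs data ((y - 1) * wid + x) + pvHs data (y * wid + x) + pvHs data ((y + 1) * wid + x)
      - PySem.List.pyGetD data (y * wid + x) 0
    = PySem.List.pyGetD data (y * wid + x - 1) 0 + PySem.List.pyGetD data (y * wid + x + 1) 0
      + PySem.List.pyGetD data ((y - 1) * wid + x - 1) 0 + PySem.List.pyGetD data ((y - 1) * wid + x) 0
      + PySem.List.pyGetD data ((y - 1) * wid + x + 1) 0
      + PySem.List.pyGetD data ((y + 1) * wid + x - 1) 0 + PySem.List.pyGetD data ((y + 1) * wid + x) 0
      + PySem.List.pyGetD data ((y + 1) * wid + x + 1) 0 := by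
  simp only [pvHs]
  ring

-- ===== VERDICT (by name: the statement is the Claim_ definition above) =====
theorem markIB_spec : Claim_equal_markIB := by
  intro data hei wid _ _
  unfold Spec_markIB markIB markIB_alt
  by_cases hh : 2 < hei
  · by_cases hw : 2 < wid
    · simp only [if_pos (And.intro hh hw)]
      apply PySem.List.foldl_congr_mem
      intro res y hy
      rw [PySem.List.mem_pyRange_one] at hy
      apply PySem.List.foldl_congr_mem
      intro acc x hx
      rw [PySem.List.mem_pyRange_one] at hx
      dsimp only
      have h1 := pv_H_read data hei wid hw (y - 1) x (by omega) (by omega) hx.1 hx.2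
      have h2 := pv_H_read data hei wid hw y x (by omega) (by omega) hx.1 hx.2
      have h3 := pv_H_read data hei wid hw (y + 1) x (by omega) (by omega) hx.1 hx.2
      rw [show y * wid + x - wid = (y - 1) * wid + x from by ring,
          show y * wid + x + wid = (y + 1) * wid + x from by ring,
          h1, h2, h3, pv_count_eq]
    · have hnil : PySem.List.pyRange 1 (wid - 1) = ([] : List Int) :=
        PySem.List.pyRange_one_eq_nil (by omega)
      simp only [hnil, List.foldl_nil]
  · have hnil : PySem.List.pyRange 1 (hei - 1) = ([] : List Int) :=
      PySem.List.pyRange_one_eq_nil (by omega)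
    simp only [hnil, List.foldl_nil]
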